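-- pv_equiv track=rewrite | github.com/Natasthedog/automator | deck_automation/services/waterfall_payloads.py | _find_canonical_column
-- ===== SOURCE A (Python) =====
-- CANONICAL_COLUMN_ALIASES: dict[str, list[str]] = {
--     "Target Level Label": ["Target Level Label", "Target Level"],
--     "Target Label": ["Target Label", "Target", "Target Type"],
--     "Year": ["Year", "Model Year"],
--     "Actuals": ["Actuals", "Actual"],
--     "Vars": ["Vars", "Var", "Variable", "Variable Name", "Bucket", "Driver"],
--     "Base": ["Base"],
--     "Promo": ["Promo", "Promotion", "Promotions"],
--     "Media": ["Media"],
--     "Blanks": ["Blanks", "Blank"],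
--     "Positives": ["Positives", "Positive", "Pos"],
--     "Negatives": ["Negatives", "Negative", "Neg"],
-- }
--
-- def _normalize_lookup_value(value: object) -> str:
--     text = str(value or "").strip().casefold()
--     return "".join(ch for ch in text if ch.isalnum())
--
-- def _find_canonical_column(value: object) -> str | None:
--     normalized = _normalize_lookup_value(value)
--     if not normalized:
--         return None
--     for canonical, aliases in CANONICAL_COLUMN_ALIASES.items():
--         if any(_normalize_lookup_value(alias) == normalized for alias in aliases):
--             return canonical
--     return None
-- ===== SOURCE B (Python) =====
-- CANONICAL_COLUMN_ALIASES: dict[str, list[str]] = {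
--     "Target Level Label": ["Target Level Label", "Target Level"],
--     "Target Label": ["Target Label", "Target", "Target Type"],
--     "Year": ["Year", "Model Year"],
--     "Actuals": ["Actuals", "Actual"],
--     "Vars": ["Vars", "Var", "Variable", "Variable Name", "Bucket", "Driver"],
--     "Base": ["Base"],
--     "Promo": ["Promo", "Promotion", "Promotions"],
--     "Media": ["Media"],
--     "Blanks": ["Blanks", "Blank"],
--     "Positives": ["Positives", "Positive", "Pos"],
--     "Negatives": ["Negatives", "Negative", "Neg"],
-- }
--
-- def _normalize_key(value: object) -> str:
--     # keep only alphanumerics, lowercased; stripping is unnecessary since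
--     # whitespace is not alphanumeric (lower == casefold on ASCII input)
--     return "".join(ch.lower() for ch in str(value or "") if ch.isalnum())
--
-- # one-time flat index: normalized alias -> canonical name, first insertion wins
-- _ALIAS_INDEX: dict[str, str] = {}
-- for _canonical, _aliases in CANONICAL_COLUMN_ALIASES.items():
--     for _alias in _aliases:
--         _ALIAS_INDEX.setdefault(_normalize_key(_alias), _canonical)
--
-- def _find_canonical_column(value: object) -> str | None:
--     # a value with no alphanumeric characters normalizes to a key absent from the index, so .get yields None
--     return _ALIAS_INDEX.get(_normalize_key(value))
-- ===== Notes on version B (the rewrite author's own statement) =====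
-- stated objective: idiomatic
-- what changed: Replaces the per-call scan over every alias group (re-normalizing all ~28 aliases on each call) with a module-level flat dict built once via setdefault (normalized alias -> canonical, first insertion wins) plus a single dict .get, and simplifies normalization to one pass (lowercase the kept alphanumerics; stripping is redundant) with no emptiness branch since no alias normalizes to an empty key.
import Mathlib
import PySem

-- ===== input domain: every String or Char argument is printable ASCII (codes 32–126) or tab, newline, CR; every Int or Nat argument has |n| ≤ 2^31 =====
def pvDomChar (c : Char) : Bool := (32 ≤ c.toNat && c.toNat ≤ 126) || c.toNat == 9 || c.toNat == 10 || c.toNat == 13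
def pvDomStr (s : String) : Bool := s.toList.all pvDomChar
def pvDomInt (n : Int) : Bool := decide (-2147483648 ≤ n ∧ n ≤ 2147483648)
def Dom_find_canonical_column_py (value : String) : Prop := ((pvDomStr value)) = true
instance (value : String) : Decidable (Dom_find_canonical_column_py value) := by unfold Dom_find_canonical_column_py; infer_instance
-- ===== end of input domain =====

-- B replaces A's per-call scan of all alias groups by a flat index built once (setdefault: first
-- insertion wins) and one dict lookup, with a one-pass normalization and no empty-string branch.

-- ===== PORT A =====
-- shared module data: CANONICAL_COLUMN_ALIASES, in insertion order
def pvTable : List (String × List String) :=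
  [("Target Level Label", ["Target Level Label", "Target Level"]),
   ("Target Label", ["Target Label", "Target", "Target Type"]),
   ("Year", ["Year", "Model Year"]),
   ("Actuals", ["Actuals", "Actual"]),
   ("Vars", ["Vars", "Var", "Variable", "Variable Name", "Bucket", "Driver"]),
   ("Base", ["Base"]),
   ("Promo", ["Promo", "Promotion", "Promotions"]),
   ("Media", ["Media"]),
   ("Blanks", ["Blanks", "Blank"]),
   ("Positives", ["Positives", "Positive", "Pos"]),
   ("Negatives", ["Negatives", "Negative", "Neg"])]

-- A's _normalize_lookup_value: str(value or "") is value itself for a string argument;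
-- .strip().casefold(), then keep only alphanumerics (casefold = lower on the ASCII domain)
def pvNormalize (s : String) : String :=
  String.ofList ((PySem.Chars.lower (PySem.Chars.strip s.toList)).filter PySem.Chars.isalnum)

-- A's for-loop over CANONICAL_COLUMN_ALIASES.items() with the any(...) test, early return
def pvScan (n : String) : List (String × List String) → Option String
  | [] => none
  | (c, as) :: rest => if as.any (fun a => pvNormalize a == n) then some c else pvScan n rest

def find_canonical_column_py (value : String) : Option String :=
  let normalized := pvNormalize value
  if normalized = "" then none else pvScan normalized pvTable

-- ===== PORT B =====
-- B's _normalize_key: one comprehension — keep alphanumerics, lowercase each kept character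
def pvNormB : List Char → List Char
  | [] => []
  | c :: cs => if PySem.Chars.isalnum c then PySem.Chars.lowerChar c :: pvNormB cs else pvNormB cs

def pvKeyB (s : String) : String := String.ofList (pvNormB s.toList)

-- module-level _ALIAS_INDEX build: setdefault, so the first insertion for a key wins
def pvIndex : PySem.Dict String String :=
  pvTable.foldl
    (fun d p => p.2.foldl (fun d a => d.setdefault (pvKeyB a) p.1) d)
    PySem.Dict.empty

def find_canonical_column_py_alt (value : String) : Option String :=
  pvIndex.get? (pvKeyB value)

-- ===== PRECONDITION & SPEC =====
def Spec_find_canonical_column_py (value : String) (out : Option String) : Prop := out = find_canonical_column_py_alt value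
instance (value : String) (out : Option String) : Decidable (Spec_find_canonical_column_py value out) := by unfold Spec_find_canonical_column_py; infer_instance

-- ===== CLAIM =====
def Claim_equal_find_canonical_column_py : Prop := ∀ (value : String), Dom_find_canonical_column_py value → Spec_find_canonical_column_py value (find_canonical_column_py value)

-- ===== LEMMAS AND PROOFS =====

theorem pv_toNat_le_iff (a b : Char) : (a ≤ b) ↔ a.toNat ≤ b.toNat := Iff.rfl

-- lowercasing a character does not change whether it is alphanumeric
theorem pv_alnum_lowerChar (c : Char) :
    PySem.Chars.isalnum (PySem.Chars.lowerChar c) = PySem.Chars.isalnum c := by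
  have h65 : ('A' : Char).toNat = 65 := rfl
  have h90 : ('Z' : Char).toNat = 90 := rfl
  have h97 : ('a' : Char).toNat = 97 := rfl
  have h122 : ('z' : Char).toNat = 122 := rfl
  have h48 : ('0' : Char).toNat = 48 := rfl
  have h57 : ('9' : Char).toNat = 57 := rfl
  simp only [PySem.Chars.isalnum, PySem.Chars.isalpha, PySem.Chars.isdigit,
    PySem.Chars.islower, PySem.Chars.isupper, PySem.Chars.lowerChar, pv_toNat_le_iff,
    h65, h90, h97, h122, h48, h57]
  split_ifs with hc
  · simp only [Bool.and_eq_true, decide_eq_true_eq] at hc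
    have hval : (c.toNat + 32).isValidChar := Or.inl (by
      show c.toNat + 32 < 0xD800; omega)
    have ht : (Char.ofNat (c.toNat + 32)).toNat = c.toNat + 32 := by
      rw [Char.toNat_ofNat, if_pos hval]
    rw [ht, Bool.eq_iff_iff]
    simp only [Bool.or_eq_true, Bool.and_eq_true, decide_eq_true_eq]
    omega
  · rfl

-- whitespace is never alphanumeric
theorem pv_space_not_alnum (c : Char) (h : PySem.Chars.isspace c = true) :
    PySem.Chars.isalnum c = false := by
  simp only [PySem.Chars.isspace, Bool.or_eq_true, Bool.and_eq_true, decide_eq_true_eq] at h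
  rw [Bool.eq_false_iff]
  intro hx
  simp only [PySem.Chars.isalnum, PySem.Chars.isalpha, PySem.Chars.isdigit,
    PySem.Chars.islower, PySem.Chars.isupper, pv_toNat_le_iff,
    Bool.or_eq_true, Bool.and_eq_true, decide_eq_true_eq] at hx
  have e1 : ('A' : Char).toNat = 65 := rfl
  have e2 : ('Z' : Char).toNat = 90 := rfl
  have e3 : ('a' : Char).toNat = 97 := rfl
  have e4 : ('z' : Char).toNat = 122 := rfl
  have e5 : ('0' : Char).toNat = 48 := rfl
  have e6 : ('9' : Char).toNat = 57 := rfl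
  omega

-- dropping a whitespace prefix does not change the alphanumeric characters
theorem pv_filter_alnum_dropWhile (l : List Char) :
    (l.dropWhile PySem.Chars.isspace).filter PySem.Chars.isalnum
      = l.filter PySem.Chars.isalnum := by
  conv_rhs => rw [← List.takeWhile_append_dropWhile (p := PySem.Chars.isspace) (l := l)]
  rw [List.filter_append]
  have h : (l.takeWhile PySem.Chars.isspace).filter PySem.Chars.isalnum = [] := by
    rw [List.filter_eq_nil_iff]
    intro a ha
    simp [pv_space_not_alnum a (List.mem_takeWhile_imp ha)]
  simp [h]

-- stripping does not change the alphanumeric characters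
theorem pv_filter_alnum_strip (l : List Char) :
    (PySem.Chars.strip l).filter PySem.Chars.isalnum = l.filter PySem.Chars.isalnum := by
  simp only [PySem.Chars.strip, PySem.Chars.rstrip, PySem.Chars.lstrip]
  rw [List.filter_reverse, pv_filter_alnum_dropWhile, List.filter_reverse,
    List.reverse_reverse, pv_filter_alnum_dropWhile]

-- B's one-pass normalization computes exactly A's strip-casefold-filter normalization
theorem pv_keyB_eq_normalize (s : String) : pvKeyB s = pvNormalize s := by
  have hB : ∀ l : List Char,
      pvNormB l = (l.filter PySem.Chars.isalnum).map PySem.Chars.lowerChar := by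
    intro l
    induction l with
    | nil => rfl
    | cons c cs ih =>
      by_cases h : PySem.Chars.isalnum c = true
      · simp [pvNormB, h, ih]
      · simp [pvNormB, h, ih]
  have hA : (PySem.Chars.lower (PySem.Chars.strip s.toList)).filter PySem.Chars.isalnum
      = (s.toList.filter PySem.Chars.isalnum).map PySem.Chars.lowerChar := by
    rw [PySem.Chars.lower, List.filter_map]
    have : (PySem.Chars.isalnum ∘ PySem.Chars.lowerChar) = PySem.Chars.isalnum :=
      funext fun c => pv_alnum_lowerChar c
    rw [this, pv_filter_alnum_strip]
  rw [pvKeyB, pvNormalize, hB, hA]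

-- lookup after the inner setdefault loop: existing entries win, else the group's canonical iff a key matches
theorem pv_inner_get? (as : List String) (c : String) (d : PySem.Dict String String) (n : String) :
    (as.foldl (fun d a => d.setdefault (pvKeyB a) c) d).get? n
      = (d.get? n).or (if as.any (fun a => pvKeyB a == n) then some c else none) := by
  induction as generalizing d with
  | nil => simp
  | cons a as ih =>
    simp only [List.foldl_cons, List.any_cons, ih]
    by_cases h : pvKeyB a = n
    · subst h
      rw [PySem.Dict.get?_setdefault_self]
      cases hd : d.get? (pvKeyB a) with
      | none => simp
      | some v => simp
    · have hne : n ≠ pvKeyB a := fun e => h e.symm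
      rw [PySem.Dict.get?_setdefault_of_ne _ _ hne]
      have hbe : (pvKeyB a == n) = false := by simp [h]
      simp [hbe]

-- lookup after the whole index build = existing entries, else A's scan of the remaining groups
theorem pv_outer_get? (T : List (String × List String)) (d : PySem.Dict String String) (n : String) :
    (T.foldl (fun d p => p.2.foldl (fun d a => d.setdefault (pvKeyB a) p.1) d) d).get? n
      = (d.get? n).or (pvScan n T) := by
  induction T generalizing d with
  | nil => simp [pvScan]
  | cons p T ih =>
    simp only [List.foldl_cons, ih, pv_inner_get?, Option.or_assoc, pvScan]
    cases p with
    | mk c as =>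
      have : (as.any fun a => pvKeyB a == n) = (as.any fun a => pvNormalize a == n) := by
        simp [pv_keyB_eq_normalize]
      rw [this]
      split <;> simp

-- no alias normalizes to the empty string
theorem pv_scan_empty : pvScan "" pvTable = none := by decide

-- ===== VERDICT =====
theorem find_canonical_column_py_spec : Claim_equal_find_canonical_column_py := by
  intro value _
  show find_canonical_column_py value = find_canonical_column_py_alt value
  unfold find_canonical_column_py find_canonical_column_py_alt pvIndex
  rw [pv_outer_get?, pv_keyB_eq_normalize]
  by_cases h : pvNormalize value = ""
  · simp [h, pv_scan_empty]
  · simp [h]
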